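-- pv_equiv track=rewrite | github.com/raniasiddiqui/The-Bin-Packing-Problem | binpacking_dp.py | bin_packing
-- ===== SOURCE A (Python) =====
-- def bin_packing(items, bin_capacity):
--     n = len(items)
--     dp = [float('inf')] * (n + 1)
--     dp[0] = 0
--     last_item_packed = [-1] * (n + 1)
--
--     for i in range(1, n + 1):
--         space_left = bin_capacity
--         for j in range(i, 0, -1):
--             space_left -= items[j - 1]
--             if space_left >= 0 and dp[j - 1] + 1 < dp[i]:
--                 dp[i] = dp[j - 1] + 1
--                 last_item_packed[i] = j - 1
--
--     # Backtrack to find items packed into each bin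
--     bins = []
--     i = n
--     while i > 0:
--         j = last_item_packed[i]
--         bins.append(items[j:i])
--         i = j
--     bins.reverse()
--     return bins
-- ===== SOURCE B (Python) =====
-- def bin_packing(items, bin_capacity):
--     # BFS shortest path on prefix indices 0..n: edge j -> i (j < i) iff items[j:i] fits a bin.
--     # Layer d of the BFS = prefixes packable with exactly d bins; parent = max frontier start.
--     n = len(items)
--     prefix = [0]
--     for x in items:
--         prefix.append(prefix[-1] + x)
--     dist = [None] * (n + 1)
--     dist[0] = 0
--     parent = [-1] * (n + 1)
--     frontier = [0]
--     d = 0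
--     while frontier:
--         nxt = []
--         for i in range(1, n + 1):
--             if dist[i] is None:
--                 best = -1
--                 for j in frontier:
--                     if j < i and prefix[i] - prefix[j] <= bin_capacity and best < j:
--                         best = j
--                 if best >= 0:
--                     dist[i] = d + 1
--                     parent[i] = best
--                     nxt.append(i)
--         frontier = nxt
--         d += 1
--
--     def chain(i):
--         if i <= 0:
--             return []
--         j = parent[i]
--         return chain(j) + [items[j:i]]
--
--     return chain(n)
-- ===== Notes on version B (the rewrite author's own statement) =====
-- stated objective: faster
-- what changed: B replaces A's bottom-up DP relaxation (for each prefix end, unconditionally rescan every earlier start with a running remaining-space counter) by a BFS shortest path over prefix indices: frontiers of prefixes reachable with exactly d bins are expanded layer by layer over precomputed prefix sums, each new node taking the maximal feasible frontier start as parent, and the bins are rebuilt by a recursive parent-chain walk instead of append-and-reverse.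
import Mathlib
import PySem

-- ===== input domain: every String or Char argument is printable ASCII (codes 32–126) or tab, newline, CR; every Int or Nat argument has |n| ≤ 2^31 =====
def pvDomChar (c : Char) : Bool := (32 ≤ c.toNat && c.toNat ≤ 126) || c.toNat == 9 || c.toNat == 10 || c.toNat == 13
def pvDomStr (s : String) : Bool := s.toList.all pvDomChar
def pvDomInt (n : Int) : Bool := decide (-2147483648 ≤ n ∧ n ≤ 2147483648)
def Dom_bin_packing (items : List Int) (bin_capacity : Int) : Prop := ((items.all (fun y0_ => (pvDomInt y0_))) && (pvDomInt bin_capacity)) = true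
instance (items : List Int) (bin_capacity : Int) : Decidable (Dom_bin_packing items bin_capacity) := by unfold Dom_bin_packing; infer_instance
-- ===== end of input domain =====

-- B replaces A's bottom-up DP relaxation by a BFS shortest path over prefix indices (layered
-- frontier expansion over precomputed prefix sums, parent = maximal feasible frontier start,
-- bins rebuilt by a recursive parent-chain walk); measured faster in a timing run, proved equal on all inputs.

-- ===== PORT A =====
-- A's dp holds float('inf') or ints: modelled as Option Int with none = inf (exact: values are only inf or ints).
def binA_lt : Option Int → Option Int → Bool
  | some a, some b => a < b
  | some _, none   => true
  | none,   _      => false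

def binA_add1 : Option Int → Option Int
  | some a => some (a + 1)
  | none   => none

-- inner loop 'for j in range(i, 0, -1)': j counts down; state = (space_left, dp[i], last_item_packed[i]).
-- items[j-1] / dp[j-1] are always in range when A runs them; getD is exact there.
def binA_inner (items : List Int) (dp : List (Option Int)) :
    Nat → Int → Option Int → Int → Option Int × Int
  | 0, _, dpi, lasti => (dpi, lasti)
  | j + 1, space, dpi, lasti =>
    let sl := space - items.getD j 0
    if 0 ≤ sl ∧ binA_lt (binA_add1 (dp.getD j none)) dpi = true then
      binA_inner items dp j sl (binA_add1 (dp.getD j none)) (j : Int)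
    else
      binA_inner items dp j sl dpi lasti

-- outer loop 'for i in range(1, n+1)' over the two arrays
def binA_loop (items : List Int) (bin_capacity : Int) (n : Nat) :
    List (Option Int) × List Int :=
  (List.range n).foldl
    (fun s k =>
      let i := k + 1
      let r := binA_inner items s.1 i bin_capacity (s.1.getD i none) (s.2.getD i (-1))
      (s.1.set i r.1, s.2.set i r.2))
    (some 0 :: List.replicate n none, List.replicate (n + 1) (-1))

-- 'while i > 0: j = last[i]; bins.append(items[j:i]); i = j' — fuel n+1 suffices (i strictly decreases)
def binA_back (items : List Int) (last : List Int) :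
    Nat → Int → List (List Int) → List (List Int)
  | 0, _, bins => bins
  | f + 1, i, bins =>
    if 0 < i then
      binA_back items last f (last.getD i.toNat (-1))
        (bins ++ [PySem.List.slice items (some (last.getD i.toNat (-1))) (some i)])
    else bins

def bin_packing (items : List Int) (bin_capacity : Int) : List (List Int) :=
  let n := items.length
  let s := binA_loop items bin_capacity n
  (binA_back items s.2 (n + 1) (n : Int) []).reverse

-- ===== PORT B =====
-- prefix = [0]; for x in items: prefix.append(prefix[-1] + x)
def binB_prefix (items : List Int) : List Int :=
  items.foldl (fun P x => P ++ [P.getLastD 0 + x]) [0]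

-- best = -1; for j in frontier: if j < i and prefix[i]-prefix[j] <= cap and best < j: best = j
def binB_best (pre : List Int) (cap : Int) (i : Nat) (frontier : List Nat) : Int :=
  frontier.foldl
    (fun best j =>
      if j < i ∧ pre.getD i 0 - pre.getD j 0 ≤ cap ∧ best < (j : Int) then (j : Int) else best)
    (-1)

-- body of 'for i in range(1, n+1)' in one BFS layer (acc = ((dist, parent), nxt))
def binB_layerStep (pre : List Int) (cap : Int) (d : Int) (frontier : List Nat) :
    ((List (Option Int) × List Int) × List Nat) → Nat → ((List (Option Int) × List Int) × List Nat) :=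
  fun acc k =>
    match acc.1.1.getD (k + 1) none with
    | some _ => acc
    | none =>
      if 0 ≤ binB_best pre cap (k + 1) frontier then
        ((acc.1.1.set (k + 1) (some (d + 1)),
          acc.1.2.set (k + 1) (binB_best pre cap (k + 1) frontier)), acc.2 ++ [k + 1])
      else acc

def binB_layer (pre : List Int) (cap : Int) (n : Nat) (d : Int) (frontier : List Nat)
    (s : List (Option Int) × List Int) : (List (Option Int) × List Int) × List Nat :=
  (List.range n).foldl (binB_layerStep pre cap d frontier) (s, [])

-- 'while frontier:' — every nonempty round settles new nodes, so fuel n+2 suffices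
def binB_bfs (pre : List Int) (cap : Int) (n : Nat) :
    Nat → Int → List Nat → List (Option Int) × List Int → List (Option Int) × List Int
  | 0, _, _, s => s
  | f + 1, d, frontier, s =>
    if frontier.isEmpty then s
    else
      let r := binB_layer pre cap n d frontier s
      binB_bfs pre cap n f (d + 1) r.2 r.1

-- def chain(i): if i <= 0: return []; j = parent[i]; return chain(j) + [items[j:i]]
-- fuel n+1 suffices: parents are strictly smaller indices
def binB_chain (items : List Int) (parent : List Int) :
    Nat → Int → List (List Int)
  | 0, _ => []
  | f + 1, i =>
    if i ≤ 0 then []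
    else
      binB_chain items parent f (parent.getD i.toNat (-1)) ++
        [PySem.List.slice items (some (parent.getD i.toNat (-1))) (some i)]

def bin_packing_alt (items : List Int) (bin_capacity : Int) : List (List Int) :=
  let n := items.length
  let s := binB_bfs (binB_prefix items) bin_capacity n (n + 2) 0 [0]
    ((List.replicate (n + 1) (none : Option Int)).set 0 (some 0), List.replicate (n + 1) (-1))
  binB_chain items s.2 (n + 1) (n : Int)

-- ===== PRECONDITION & SPEC =====
def Spec_bin_packing (items : List Int) (bin_capacity : Int) (out : List (List Int)) : Prop := out = bin_packing_alt items bin_capacity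
instance (items : List Int) (bin_capacity : Int) (out : List (List Int)) : Decidable (Spec_bin_packing items bin_capacity out) := by unfold Spec_bin_packing; infer_instance

-- ===== CLAIM (what is proved, stated in full; the proofs are below) =====
def Claim_equal_bin_packing : Prop := ∀ (items : List Int) (bin_capacity : Int), Dom_bin_packing items bin_capacity → Spec_bin_packing items bin_capacity (bin_packing items bin_capacity)

-- ===== LEMMAS AND PROOFS =====

-- small getD/set facts
theorem pvGetD_set_self {a : Type} [Inhabited a] (l : List a) (i : Nat) (v d : a)
    (h : i < l.length) : (l.set i v).getD i d = v := by
  simp [List.getD, h]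

theorem pvGetD_set_ne {a : Type} [Inhabited a] (l : List a) (i k : Nat) (v d : a)
    (h : i ≠ k) : (l.set i v).getD k d = l.getD k d := by
  simp [List.getD, List.getElem?_set_ne h]

theorem pvGetD_replicate {a : Type} [Inhabited a] (n j : Nat) (x : a) :
    (List.replicate n x).getD j x = x := by
  rcases Nat.lt_or_ge j n with h | h
  · exact List.getD_replicate x h
  · exact List.getD_eq_default _ _ (by simpa using h)

-- canonical table machinery: pvStep/pvAsc (ascending scan, '<=' update), pvDesc (A's descending
-- strict scan), pvS (the canonical DP table both ports realise)
def pvStep (s : Option Int × Int) (c : Option Int) (j : Nat) : Option Int × Int :=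
  match c with
  | none => s
  | some v =>
    match s.1 with
    | none => (some v, (j : Int))
    | some b => if v ≤ b then (some v, (j : Int)) else s

def pvAsc (c : Nat → Option Int) (l : List Nat) (s : Option Int × Int) : Option Int × Int :=
  l.foldl (fun t j => pvStep t (c j) j) s

def pvDesc (c : Nat → Option Int) : Nat → Option Int × Int → Option Int × Int
  | 0, s => s
  | j + 1, s => pvDesc c j (if binA_lt (c j) s.1 = true then (c j, (j : Int)) else s)

def pvCand (pre : List Int) (cap : Int) (l : List (Option Int × Int)) (i j : Nat) : Option Int :=
  if pre.getD i 0 - pre.getD j 0 ≤ cap then binA_add1 (l.getD j (none, -1)).1 else none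

def pvSpecl (pre : List Int) (cap : Int) : Nat → List (Option Int × Int)
  | 0 => [(some 0, -1)]
  | i + 1 => pvSpecl pre cap i ++
      [pvAsc (pvCand pre cap (pvSpecl pre cap i) (i + 1)) (List.range (i + 1)) (none, -1)]

def pvS (pre : List Int) (cap : Int) (i : Nat) : Option Int × Int :=
  (pvSpecl pre cap i).getD i (none, -1)

def pvC (pre : List Int) (cap : Int) (i j : Nat) : Option Int :=
  if pre.getD i 0 - pre.getD j 0 ≤ cap then binA_add1 (pvS pre cap j).1 else none

theorem pvSpecl_length (pre : List Int) (cap : Int) : ∀ i, (pvSpecl pre cap i).length = i + 1 := by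
  intro i; induction i with
  | zero => rfl
  | succ i ih => simp [pvSpecl, ih]

theorem pvSpecl_getD (pre : List Int) (cap : Int) : ∀ i j, j ≤ i →
    (pvSpecl pre cap i).getD j (none, -1) = pvS pre cap j := by
  intro i
  induction i with
  | zero => intro j hj; interval_cases j; rfl
  | succ i ih =>
    intro j hj
    rcases Nat.lt_or_ge j (i + 1) with hlt | hge
    · have hl : j < (pvSpecl pre cap i).length := by rw [pvSpecl_length]; exact hlt
      rw [pvSpecl, List.getD_append _ _ _ _ hl]
      exact ih j (by omega)
    · have hj' : j = i + 1 := by omega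
      subst hj'
      rfl

theorem pvAsc_congr (c c' : Nat → Option Int) : ∀ (l : List Nat) (s : Option Int × Int),
    (∀ j ∈ l, c j = c' j) → pvAsc c l s = pvAsc c' l s := by
  intro l
  induction l with
  | nil => intro s _; rfl
  | cons j l ih =>
    intro s h
    simp only [pvAsc, List.foldl_cons]
    rw [h j (by simp)]
    exact ih _ (fun k hk => h k (by simp [hk]))

theorem pvS_zero (pre : List Int) (cap : Int) : pvS pre cap 0 = (some 0, -1) := rfl

theorem pvS_succ (pre : List Int) (cap : Int) (i : Nat) :
    pvS pre cap (i + 1) = pvAsc (pvC pre cap (i + 1)) (List.range (i + 1)) (none, -1) := by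
  have hlen : (pvSpecl pre cap i).length = i + 1 := pvSpecl_length pre cap i
  have h1 : pvS pre cap (i + 1)
      = pvAsc (pvCand pre cap (pvSpecl pre cap i) (i + 1)) (List.range (i + 1)) (none, -1) := by
    show (pvSpecl pre cap (i+1)).getD (i+1) (none, -1) = _
    rw [pvSpecl]
    have : i + 1 = (pvSpecl pre cap i).length := hlen.symm
    rw [this]
    simp [List.getD]
  rw [h1]
  apply pvAsc_congr
  intro j hj
  have hj' : j ≤ i := by simpa [Nat.lt_succ_iff] using (List.mem_range.mp hj)
  have h2 := pvSpecl_getD pre cap i j hj'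
  simp only [List.getD_eq_getElem?_getD] at h2
  simp [pvCand, pvC, h2]

theorem pvStep_fst_none (s : Option Int × Int) (c : Option Int) (j : Nat)
    (h : (pvStep s c j).1 = none) : pvStep s c j = s := by
  cases c with
  | none => rfl
  | some v =>
    cases hs : s.1 with
    | none => simp [pvStep, hs] at h
    | some b =>
      simp only [pvStep, hs]
      split
      · simp [pvStep, hs] at h
        split at h <;> simp_all
      · rfl

theorem pvAsc_none (c : Nat → Option Int) : ∀ (l : List Nat) (s : Option Int × Int),
    (pvAsc c l s).1 = none → pvAsc c l s = s := by
  intro l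
  induction l with
  | nil => intro s _; rfl
  | cons j l ih =>
    intro s h
    have h1 : pvAsc c (j :: l) s = pvAsc c l (pvStep s (c j) j) := rfl
    rw [h1] at h ⊢
    have h2 := ih _ h
    rw [h2] at h ⊢
    exact pvStep_fst_none s (c j) j h

-- the two scan orders and update rules produce the same (min, tie-broken argmin)
theorem pvDesc_asc (c : Nat → Option Int) : ∀ (m : Nat) (s : Option Int × Int),
    pvDesc c m s =
      (if binA_lt (pvAsc c (List.range m) (none, -1)).1 s.1 = true
       then pvAsc c (List.range m) (none, -1) else s) := by
  intro m
  induction m with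
  | zero =>
    intro s
    simp [pvDesc, pvAsc, binA_lt]
  | succ m ih =>
    intro s
    have hr : pvAsc c (List.range (m + 1)) (none, -1)
        = pvStep (pvAsc c (List.range m) (none, -1)) (c m) m := by
      simp only [pvAsc, List.range_succ, List.foldl_append, List.foldl_cons, List.foldl_nil]
    simp only [pvDesc]
    rw [ih, hr]
    set r := pvAsc c (List.range m) (none, -1) with hrdef
    have hnone : r.1 = none → r = (none, -1) := fun h => pvAsc_none c _ _ h
    clear_value r
    clear hrdef ih
    obtain ⟨r1, r2⟩ := r
    obtain ⟨s1, s2⟩ := s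
    cases hc : c m with
    | none =>
      cases r1 <;> cases s1 <;> simp [pvStep, binA_lt]
    | some v =>
      cases r1 with
      | none =>
        have h0 : r2 = (-1 : Int) := by
          simpa using congrArg Prod.snd (hnone rfl)
        subst h0
        cases s1 with
        | none => simp [pvStep, binA_lt]
        | some sb =>
          simp only [pvStep, binA_lt, decide_eq_true_eq]
          split_ifs <;>
            simp_all only [binA_lt, Prod.mk.injEq, decide_eq_true_eq] <;>
            first | rfl | omega | (exfalso; omega) | (constructor <;> omega)
                  | (exact absurd trivial ‹¬True›)
      | some rb =>
        cases s1 with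
        | none =>
          simp only [pvStep, binA_lt, decide_eq_true_eq]
          split_ifs <;>
            simp_all only [binA_lt, Prod.mk.injEq, decide_eq_true_eq] <;>
            first | rfl | omega | (exfalso; omega) | (constructor <;> omega)
                  | (exact absurd trivial ‹¬True›)
        | some sb =>
          simp only [pvStep, binA_lt, decide_eq_true_eq]
          split_ifs <;>
            simp_all only [binA_lt, Prod.mk.injEq, decide_eq_true_eq] <;>
            first | rfl | omega | (exfalso; omega) | (constructor <;> omega)
                  | (exact absurd trivial ‹¬True›)

theorem pvDesc_congr (c c' : Nat → Option Int) : ∀ (m : Nat) (s : Option Int × Int),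
    (∀ j, j < m → c j = c' j) → pvDesc c m s = pvDesc c' m s := by
  intro m
  induction m with
  | zero => intro s _; rfl
  | succ m ih =>
    intro s h
    simp only [pvDesc]
    rw [h m (by omega)]
    exact ih _ (fun j hj => h j (by omega))

-- B's prefix list is scanl (+) 0
theorem pvFoldlP (items : List Int) : ∀ (l : List Int) (s : Int),
    items.foldl (fun P x => P ++ [P.getLastD 0 + x]) (l ++ [s]) = l ++ List.scanl (· + ·) s items := by
  induction items with
  | nil => intro l s; simp
  | cons x t ih =>
    intro l s
    have h1 : (l ++ [s]).getLastD 0 = s := by simp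
    simp only [List.foldl_cons, h1, List.scanl_cons]
    have := ih (l ++ [s]) (s + x)
    simpa using this

theorem pvPrefix_eq (items : List Int) : binB_prefix items = List.scanl (· + ·) 0 items := by
  have := pvFoldlP items [] 0
  simpa [binB_prefix] using this

theorem pvScanl_getD_succ : ∀ (t : List Int) (j : Nat) (s : Int), j < t.length →
    (List.scanl (· + ·) s t).getD (j + 1) 0 = (List.scanl (· + ·) s t).getD j 0 + t.getD j 0 := by
  intro t
  induction t with
  | nil => intro j s h; simp at h
  | cons x t ih =>
    intro j s h
    cases j with
    | zero =>
      cases t <;> simp [List.scanl, List.getD]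
    | succ j =>
      have hj : j < t.length := by simpa using h
      have := ih j (s + x) hj
      simpa [List.scanl, List.getD] using this

theorem pvPrefix_succ (items : List Int) (j : Nat) (h : j < items.length) :
    (binB_prefix items).getD (j + 1) 0 = (binB_prefix items).getD j 0 + items.getD j 0 := by
  rw [pvPrefix_eq]; exact pvScanl_getD_succ items j 0 h

-- A's inner loop is the descending scan with prefix-sum feasibility gates
theorem binA_inner_desc (items : List Int) (cap : Int) (dp : List (Option Int)) (i : Nat)
    (hi : i ≤ items.length) : ∀ j, j ≤ i → ∀ (dpi : Option Int) (lasti : Int),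
    binA_inner items dp j (cap - ((binB_prefix items).getD i 0 - (binB_prefix items).getD j 0)) dpi lasti
      = pvDesc (fun j' => if (binB_prefix items).getD i 0 - (binB_prefix items).getD j' 0 ≤ cap
                          then binA_add1 (dp.getD j' none) else none) j (dpi, lasti) := by
  intro j
  induction j with
  | zero => intro _ dpi lasti; rfl
  | succ j ih =>
    intro hj dpi lasti
    have hjlen : j < items.length := by omega
    have hps := pvPrefix_succ items j hjlen
    simp only [binA_inner, pvDesc]
    have hsl : cap - ((binB_prefix items).getD i 0 - (binB_prefix items).getD (j + 1) 0)
          - items.getD j 0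
        = cap - ((binB_prefix items).getD i 0 - (binB_prefix items).getD j 0) := by
      rw [hps]; ring
    rw [hsl]
    by_cases hgate : (binB_prefix items).getD i 0 - (binB_prefix items).getD j 0 ≤ cap
    · simp only [if_pos hgate]
      by_cases hlt : binA_lt (binA_add1 (dp.getD j none)) dpi = true
      · rw [if_pos ⟨by omega, hlt⟩, if_pos hlt]
        exact ih (by omega) _ _
      · rw [if_neg (by tauto), if_neg hlt]
        exact ih (by omega) _ _
    · simp only [if_neg hgate]
      have hc : ¬ (0 ≤ cap - ((binB_prefix items).getD i 0 - (binB_prefix items).getD j 0) ∧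
            binA_lt (binA_add1 (dp.getD j none)) dpi = true) := by
        intro hcc; exact hgate (by omega)
      rw [if_neg hc]
      have hfalse : binA_lt none dpi = false := by cases dpi <;> rfl
      rw [if_neg (by simp [hfalse])]
      exact ih (by omega) _ _

-- A-side loop invariant: A's arrays realise the canonical table pvS
def pvInvA (items : List Int) (cap : Int) (k : Nat) (s : List (Option Int) × List Int) : Prop :=
  s.1.length = items.length + 1 ∧ s.2.length = items.length + 1 ∧
  (∀ i : Nat, i ≤ k → s.1.getD i none = (pvS (binB_prefix items) cap i).1 ∧
      s.2.getD i (-1) = (pvS (binB_prefix items) cap i).2) ∧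
  (∀ i : Nat, k < i → s.1.getD i none = none ∧ s.2.getD i (-1) = -1)

theorem pvInvA_init (items : List Int) (cap : Int) :
    pvInvA items cap 0 (some 0 :: List.replicate items.length none, List.replicate (items.length + 1) (-1)) := by
  refine ⟨by simp, by simp, ?_, ?_⟩
  · intro i hi
    interval_cases i
    refine ⟨rfl, ?_⟩
    rw [pvS_zero]
    exact pvGetD_replicate (items.length + 1) 0 (-1 : Int)
  · intro i hi
    obtain ⟨m, rfl⟩ : ∃ m, i = m + 1 := ⟨i - 1, by omega⟩
    constructor
    · simpa [List.getD] using congrArg (fun o => o.getD none)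
        (by simp [List.getElem?_replicate] : (List.replicate items.length (none : Option Int))[m]? = _)
    · simpa using pvGetD_replicate (items.length + 1) (m + 1) (-1 : Int)

theorem pvInvA_step (items : List Int) (cap : Int) (k : Nat) (s : List (Option Int) × List Int)
    (hk : k < items.length) (h : pvInvA items cap k s) :
    pvInvA items cap (k + 1)
      (let i := k + 1
       let r := binA_inner items s.1 i cap (s.1.getD i none) (s.2.getD i (-1))
       (s.1.set i r.1, s.2.set i r.2)) := by
  obtain ⟨h1, h2, h3, h4⟩ := h
  show pvInvA items cap (k + 1)
    (s.1.set (k + 1) (binA_inner items s.1 (k + 1) cap (s.1.getD (k + 1) none) (s.2.getD (k + 1) (-1))).1,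
     s.2.set (k + 1) (binA_inner items s.1 (k + 1) cap (s.1.getD (k + 1) none) (s.2.getD (k + 1) (-1))).2)
  rw [(h4 (k + 1) (by omega)).1, (h4 (k + 1) (by omega)).2]
  have hr : binA_inner items s.1 (k + 1) cap none (-1) = pvS (binB_prefix items) cap (k + 1) := by
    have e0 : cap - ((binB_prefix items).getD (k + 1) 0 - (binB_prefix items).getD (k + 1) 0) = cap := by
      ring
    have hdesc := binA_inner_desc items cap s.1 (k + 1) hk (k + 1) le_rfl none (-1)
    rw [e0] at hdesc
    rw [hdesc]
    rw [pvDesc_congr _ (pvC (binB_prefix items) cap (k + 1)) (k + 1) (none, -1)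
        (by
          intro j' hj'
          simp only [pvC]
          rw [(h3 j' (by omega)).1])]
    rw [pvDesc_asc, ← pvS_succ (binB_prefix items) cap k]
    cases hv : (pvS (binB_prefix items) cap (k + 1)).1 with
    | some v => simp [binA_lt]
    | none =>
      rw [if_neg (by simp [binA_lt])]
      rw [pvS_succ (binB_prefix items) cap k] at hv ⊢
      exact (pvAsc_none _ _ _ hv).symm
  rw [hr]
  have hlen1 : k + 1 < s.1.length := by omega
  have hlen2 : k + 1 < s.2.length := by omega
  refine ⟨by simpa using h1, by simpa using h2, ?_, ?_⟩
  · intro i hi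
    rcases Nat.lt_or_ge i (k + 1) with hlt | hge
    · rw [pvGetD_set_ne _ _ _ _ _ (by omega), pvGetD_set_ne _ _ _ _ _ (by omega)]
      exact h3 i (by omega)
    · have : i = k + 1 := by omega
      subst this
      rw [pvGetD_set_self _ _ _ _ hlen1, pvGetD_set_self _ _ _ _ hlen2]
      exact ⟨rfl, rfl⟩
  · intro i hi
    rw [pvGetD_set_ne _ _ _ _ _ (by omega), pvGetD_set_ne _ _ _ _ _ (by omega)]
    exact h4 i (by omega)

theorem pvInvA_foldl (items : List Int) (cap : Int) : ∀ k, k ≤ items.length →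
    pvInvA items cap k
      ((List.range k).foldl
        (fun s k' =>
          let i := k' + 1
          let r := binA_inner items s.1 i cap (s.1.getD i none) (s.2.getD i (-1))
          (s.1.set i r.1, s.2.set i r.2))
        (some 0 :: List.replicate items.length none, List.replicate (items.length + 1) (-1))) := by
  intro k
  induction k with
  | zero => intro _; exact pvInvA_init items cap
  | succ k ih =>
    intro hk
    rw [List.range_succ, List.foldl_append, List.foldl_cons, List.foldl_nil]
    exact pvInvA_step items cap k _ (by omega) (ih (by omega))

-- ===== B-side: characterisation of the canonical table (min value, maximal argmin) =====
theorem pvAsc_spec (c : Nat → Option Int) : ∀ m : Nat,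
    (pvAsc c (List.range m) (none, -1) = ((none : Option Int), (-1 : Int)) ∧ ∀ j, j < m → c j = none)
    ∨ (∃ (v : Int) (jm : Nat), pvAsc c (List.range m) (none, -1) = (some v, (jm : Int)) ∧ jm < m ∧
        c jm = some v ∧ (∀ k, k < m → ∀ w, c k = some w → v ≤ w) ∧
        (∀ k, jm < k → k < m → c k ≠ some v)) := by
  intro m
  induction m with
  | zero => left; exact ⟨rfl, by omega⟩
  | succ m ih =>
    have hstep : pvAsc c (List.range (m + 1)) (none, -1)
        = pvStep (pvAsc c (List.range m) (none, -1)) (c m) m := by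
      simp only [pvAsc, List.range_succ, List.foldl_append, List.foldl_cons, List.foldl_nil]
    rcases ih with ⟨heq, hall⟩ | ⟨v, jm, heq, hjm, hc, hmin, hmax⟩
    · cases hcm : c m with
      | none =>
        left
        refine ⟨by rw [hstep, heq, hcm]; rfl, ?_⟩
        intro j hj
        rcases Nat.lt_or_ge j m with h | h
        · exact hall j h
        · have : j = m := by omega
          subst this; exact hcm
      | some w =>
        right
        refine ⟨w, m, by rw [hstep, heq, hcm]; rfl, by omega, hcm, ?_, by intro k h1 h2; omega⟩
        intro k hk w' hck
        rcases Nat.lt_or_ge k m with h | h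
        · rw [hall k h] at hck; cases hck
        · have : k = m := by omega
          subst this; rw [hcm] at hck
          injection hck with h'; omega
    · cases hcm : c m with
      | none =>
        right
        refine ⟨v, jm, by rw [hstep, heq, hcm]; rfl, by omega, hc, ?_, ?_⟩
        · intro k hk w hck
          rcases Nat.lt_or_ge k m with h | h
          · exact hmin k h w hck
          · have : k = m := by omega
            subst this; rw [hcm] at hck; cases hck
        · intro k h1 h2
          rcases Nat.lt_or_ge k m with h | h
          · exact hmax k h1 h
          · have : k = m := by omega
            subst this; rw [hcm]; simp
      | some w =>
        by_cases hle : w ≤ v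
        · right
          refine ⟨w, m, ?_, by omega, hcm, ?_, by intro k h1 h2; omega⟩
          · rw [hstep, heq, hcm]; simp [pvStep, hle]
          · intro k hk w' hck
            rcases Nat.lt_or_ge k m with h | h
            · exact le_trans hle (hmin k h w' hck)
            · have : k = m := by omega
              subst this; rw [hcm] at hck
              injection hck with h'; omega
        · right
          refine ⟨v, jm, ?_, by omega, hc, ?_, ?_⟩
          · rw [hstep, heq, hcm]; simp [pvStep, hle]
          · intro k hk w' hck
            rcases Nat.lt_or_ge k m with h | h
            · exact hmin k h w' hck
            · have : k = m := by omega
              subst this; rw [hcm] at hck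
              injection hck with h'; omega
          · intro k h1 h2
            rcases Nat.lt_or_ge k m with h | h
            · exact hmax k h1 h
            · have : k = m := by omega
              subst this; rw [hcm]
              intro hcon; injection hcon with h'; omega

theorem pvS_spec (pre : List Int) (cap : Int) (i : Nat) (h : 1 ≤ i) :
    (pvS pre cap i = ((none : Option Int), (-1 : Int)) ∧ ∀ j, j < i → pvC pre cap i j = none)
    ∨ (∃ (v : Int) (jm : Nat), pvS pre cap i = (some v, (jm : Int)) ∧ jm < i ∧
        pvC pre cap i jm = some v ∧ (∀ k, k < i → ∀ w, pvC pre cap i k = some w → v ≤ w) ∧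
        (∀ k, jm < k → k < i → pvC pre cap i k ≠ some v)) := by
  obtain ⟨m, rfl⟩ : ∃ m, i = m + 1 := ⟨i - 1, by omega⟩
  rw [pvS_succ]
  exact pvAsc_spec (pvC pre cap (m + 1)) (m + 1)

theorem pvC_inv (pre : List Int) (cap : Int) (i j : Nat) (w : Int)
    (h : pvC pre cap i j = some w) :
    pre.getD i 0 - pre.getD j 0 ≤ cap ∧ (pvS pre cap j).1 = some (w - 1) := by
  unfold pvC at h
  by_cases hfeas : pre.getD i 0 - pre.getD j 0 ≤ cap
  · rw [if_pos hfeas] at h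
    refine ⟨hfeas, ?_⟩
    cases hx : (pvS pre cap j).1 with
    | none => rw [hx] at h; cases h
    | some u =>
      rw [hx] at h
      simp only [binA_add1, Option.some.injEq] at h
      exact congrArg some (by omega)
  · rw [if_neg hfeas] at h
    cases h

theorem pvC_mk (pre : List Int) (cap : Int) (i j : Nat) (u : Int)
    (hfeas : pre.getD i 0 - pre.getD j 0 ≤ cap) (hl : (pvS pre cap j).1 = some u) :
    pvC pre cap i j = some (u + 1) := by
  unfold pvC
  rw [if_pos hfeas, hl]
  rfl

theorem pvLvl_nonneg (pre : List Int) (cap : Int) : ∀ i : Nat, ∀ e : Int,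
    (pvS pre cap i).1 = some e → 0 ≤ e := by
  intro i
  induction i using Nat.strong_induction_on with
  | _ i ih =>
    intro e he
    cases i with
    | zero =>
      rw [pvS_zero] at he
      injection he with h'; omega
    | succ m =>
      rcases pvS_spec pre cap (m + 1) (by omega) with ⟨heq, _⟩ | ⟨v, jm, heq, hjm, hc, _, _⟩
      · rw [heq] at he; cases he
      · have hv : v = e := by
          rw [heq] at he
          exact Option.some.inj he
        subst hv
        obtain ⟨_, hl⟩ := pvC_inv pre cap (m + 1) jm v hc
        have := ih jm (by omega) (v - 1) hl
        omega

theorem pvLvl_pos (pre : List Int) (cap : Int) (i : Nat) (e : Int) (hi : 1 ≤ i)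
    (he : (pvS pre cap i).1 = some e) : 1 ≤ e := by
  rcases pvS_spec pre cap i hi with ⟨heq, _⟩ | ⟨v, jm, heq, hjm, hc, _, _⟩
  · rw [heq] at he; cases he
  · have hv : v = e := by rw [heq] at he; exact Option.some.inj he
    subst hv
    obtain ⟨_, hl⟩ := pvC_inv pre cap i jm v hc
    have := pvLvl_nonneg pre cap jm (v - 1) hl
    omega

theorem pvP_none (pre : List Int) (cap : Int) (i : Nat)
    (h : (pvS pre cap i).1 = none) : (pvS pre cap i).2 = -1 := by
  cases i with
  | zero => rw [pvS_zero] at h; cases h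
  | succ m =>
    rcases pvS_spec pre cap (m + 1) (by omega) with ⟨heq, _⟩ | ⟨v, jm, heq, _, _, _, _⟩
    · rw [heq]
    · rw [heq] at h; cases h

-- levels are down-closed (a node at level e yields nodes at every level below)
theorem pvLvl_down (pre : List Int) (cap : Int) : ∀ i : Nat, ∀ e e' : Int,
    (pvS pre cap i).1 = some e → 0 ≤ e' → e' ≤ e →
    ∃ j : Nat, j ≤ i ∧ (pvS pre cap j).1 = some e' := by
  intro i
  induction i using Nat.strong_induction_on with
  | _ i ih =>
    intro e e' he h0 hle
    by_cases heq' : e' = e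
    · exact ⟨i, le_rfl, by rw [he, heq']⟩
    · cases i with
      | zero =>
        rw [pvS_zero] at he
        injection he with h'
        omega
      | succ m =>
        rcases pvS_spec pre cap (m + 1) (by omega) with ⟨hq, _⟩ | ⟨v, jm, hq, hjm, hc, _, _⟩
        · rw [hq] at he; cases he
        · have hv : v = e := by rw [hq] at he; exact Option.some.inj he
          subst hv
          obtain ⟨_, hl⟩ := pvC_inv pre cap (m + 1) jm v hc
          obtain ⟨j, hj1, hj2⟩ := ih jm (by omega) (v - 1) e' hl h0 (by omega)
          exact ⟨j, by omega, hj2⟩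

theorem pvGap (pre : List Int) (cap : Int) (n : Nat) (d : Int) (hd : 0 ≤ d)
    (H : ∀ j : Nat, j ≤ n → (pvS pre cap j).1 ≠ some d) :
    ∀ i : Nat, i ≤ n → ∀ e : Int, (pvS pre cap i).1 = some e → e < d := by
  intro i hi e he
  by_contra hcon
  obtain ⟨j, hj1, hj2⟩ := pvLvl_down pre cap i e d he hd (by omega)
  exact H j (by omega) hj2

-- spec of the max-scan over the frontier
theorem pvBestFold (pre : List Int) (cap : Int) (i : Nat) : ∀ (fr : List Nat) (b0 : Int),
    ((fr.foldl (fun best j =>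
        if j < i ∧ pre.getD i 0 - pre.getD j 0 ≤ cap ∧ best < (j : Int) then (j : Int) else best) b0
      = b0)
    ∨ (∃ j ∈ fr, fr.foldl (fun best j =>
        if j < i ∧ pre.getD i 0 - pre.getD j 0 ≤ cap ∧ best < (j : Int) then (j : Int) else best) b0
      = (j : Int) ∧ j < i ∧ pre.getD i 0 - pre.getD j 0 ≤ cap))
    ∧ b0 ≤ fr.foldl (fun best j =>
        if j < i ∧ pre.getD i 0 - pre.getD j 0 ≤ cap ∧ best < (j : Int) then (j : Int) else best) b0
    ∧ (∀ j ∈ fr, j < i → pre.getD i 0 - pre.getD j 0 ≤ cap →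
        (j : Int) ≤ fr.foldl (fun best j =>
          if j < i ∧ pre.getD i 0 - pre.getD j 0 ≤ cap ∧ best < (j : Int) then (j : Int) else best) b0) := by
  intro fr
  induction fr with
  | nil => intro b0; exact ⟨Or.inl rfl, le_refl _, by simp⟩
  | cons j0 t ih =>
    intro b0
    simp only [List.foldl_cons]
    by_cases hcond : j0 < i ∧ pre.getD i 0 - pre.getD j0 0 ≤ cap ∧ b0 < (j0 : Int)
    · rw [if_pos hcond]
      obtain ⟨g1, g2, g3⟩ := ih (j0 : Int)
      refine ⟨?_, le_trans (le_of_lt hcond.2.2) g2, ?_⟩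
      · rcases g1 with h | ⟨j, hj, hfold, hji, hfeas⟩
        · exact Or.inr ⟨j0, by simp, h, hcond.1, hcond.2.1⟩
        · exact Or.inr ⟨j, by simp [hj], hfold, hji, hfeas⟩
      · intro j hj hji hfeas
        rcases List.mem_cons.mp hj with rfl | hj'
        · exact g2
        · exact g3 j hj' hji hfeas
    · rw [if_neg hcond]
      obtain ⟨g1, g2, g3⟩ := ih b0
      refine ⟨?_, g2, ?_⟩
      · rcases g1 with h | ⟨j, hj, hfold, hji, hfeas⟩
        · exact Or.inl h
        · exact Or.inr ⟨j, by simp [hj], hfold, hji, hfeas⟩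
      · intro j hj hji hfeas
        rcases List.mem_cons.mp hj with rfl | hj'
        · have hb0 : ¬ (b0 < (j : Int)) := fun hb => hcond ⟨hji, hfeas, hb⟩
          omega
        · exact g3 j hj' hji hfeas

theorem pvBest_spec (pre : List Int) (cap : Int) (i : Nat) (fr : List Nat) :
    (binB_best pre cap i fr = -1 ∧
      ∀ j ∈ fr, ¬(j < i ∧ pre.getD i 0 - pre.getD j 0 ≤ cap))
    ∨ (∃ j ∈ fr, binB_best pre cap i fr = (j : Int) ∧ j < i ∧
        pre.getD i 0 - pre.getD j 0 ≤ cap ∧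
        ∀ j' ∈ fr, j' < i → pre.getD i 0 - pre.getD j' 0 ≤ cap →
          (j' : Int) ≤ binB_best pre cap i fr) := by
  obtain ⟨g1, g2, g3⟩ := pvBestFold pre cap i fr (-1)
  rcases g1 with h | ⟨j, hj, hfold, hji, hfeas⟩
  · left
    refine ⟨h, ?_⟩
    intro j hj hcon
    have := g3 j hj hcon.1 hcon.2
    rw [h] at this
    omega
  · right
    exact ⟨j, hj, hfold, hji, hfeas, fun j' hj' h1 h2 => g3 j' hj' h1 h2⟩

-- whether the layer loop settles index i (in terms of the state at the layer's start)
def pvNew (pre : List Int) (cap : Int) (fr : List Nat)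
    (s : List (Option Int) × List Int) (i : Nat) : Bool :=
  (s.1.getD i none).isNone && decide (0 ≤ binB_best pre cap i fr)

-- syntactic description of one BFS layer
theorem pvLayer_syn (pre : List Int) (cap : Int) (d : Int) (fr : List Nat)
    (s : List (Option Int) × List Int) (n : Nat)
    (h1 : s.1.length = n + 1) (h2 : s.2.length = n + 1) : ∀ k, k ≤ n →
    ((List.range k).foldl (binB_layerStep pre cap d fr) (s, [])).1.1.length = n + 1 ∧
    ((List.range k).foldl (binB_layerStep pre cap d fr) (s, [])).1.2.length = n + 1 ∧
    (∀ i : Nat, ((List.range k).foldl (binB_layerStep pre cap d fr) (s, [])).1.1.getD i none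
      = if 1 ≤ i ∧ i ≤ k ∧ pvNew pre cap fr s i = true then some (d + 1) else s.1.getD i none) ∧
    (∀ i : Nat, ((List.range k).foldl (binB_layerStep pre cap d fr) (s, [])).1.2.getD i (-1)
      = if 1 ≤ i ∧ i ≤ k ∧ pvNew pre cap fr s i = true then binB_best pre cap i fr else s.2.getD i (-1)) ∧
    ((List.range k).foldl (binB_layerStep pre cap d fr) (s, [])).2
      = (((List.range k).map (· + 1)).filter (fun i => pvNew pre cap fr s i)) := by
  intro k
  induction k with
  | zero =>
    intro _
    refine ⟨h1, h2, ?_, ?_, rfl⟩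
    · intro i; rw [if_neg (by omega)]; rfl
    · intro i; rw [if_neg (by omega)]; rfl
  | succ k ih =>
    intro hk
    obtain ⟨g1, g2, g3, g4, g5⟩ := ih (by omega)
    rw [List.range_succ, List.foldl_append, List.foldl_cons, List.foldl_nil]
    set acc := (List.range k).foldl (binB_layerStep pre cap d fr) (s, []) with hacc
    have hread : acc.1.1.getD (k + 1) none = s.1.getD (k + 1) none := by
      rw [g3]; rw [if_neg (by omega)]
    have hmapf : ((List.range k ++ [k]).map (· + 1)).filter (fun i => pvNew pre cap fr s i)
        = (((List.range k).map (· + 1)).filter (fun i => pvNew pre cap fr s i))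
          ++ (if pvNew pre cap fr s (k + 1) = true then [k + 1] else []) := by
      rw [List.map_append, List.filter_append]
      cases hp : pvNew pre cap fr s (k + 1) <;> simp [hp]
    cases hentry : s.1.getD (k + 1) none with
    | some x =>
      have hnew : pvNew pre cap fr s (k + 1) = false := by
        unfold pvNew
        rw [hentry]
        rfl
      have hstep : binB_layerStep pre cap d fr acc k = acc := by
        unfold binB_layerStep
        rw [hread, hentry]
      rw [hstep]
      refine ⟨g1, g2, ?_, ?_, ?_⟩
      · intro i
        rw [g3]
        by_cases hik : i = k + 1
        · subst hik
          rw [if_neg (by omega), if_neg (by simp [hnew])]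
        · by_cases hi : 1 ≤ i ∧ i ≤ k ∧ pvNew pre cap fr s i = true
          · rw [if_pos hi, if_pos ⟨hi.1, by omega, hi.2.2⟩]
          · rw [if_neg hi, if_neg (by rintro ⟨a, b, c⟩; exact hi ⟨a, by omega, c⟩)]
      · intro i
        rw [g4]
        by_cases hik : i = k + 1
        · subst hik
          rw [if_neg (by omega), if_neg (by simp [hnew])]
        · by_cases hi : 1 ≤ i ∧ i ≤ k ∧ pvNew pre cap fr s i = true
          · rw [if_pos hi, if_pos ⟨hi.1, by omega, hi.2.2⟩]
          · rw [if_neg hi, if_neg (by rintro ⟨a, b, c⟩; exact hi ⟨a, by omega, c⟩)]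
      · rw [g5, hmapf, hnew]
        simp
    | none =>
      by_cases hbest : 0 ≤ binB_best pre cap (k + 1) fr
      · have hnew : pvNew pre cap fr s (k + 1) = true := by
          unfold pvNew
          rw [hentry]
          simp [hbest]
        have hstep : binB_layerStep pre cap d fr acc k
            = ((acc.1.1.set (k + 1) (some (d + 1)), acc.1.2.set (k + 1) (binB_best pre cap (k + 1) fr)),
               acc.2 ++ [k + 1]) := by
          unfold binB_layerStep
          rw [hread, hentry]
          simp [hbest]
        rw [hstep]
        have hl1 : k + 1 < acc.1.1.length := by omega
        have hl2 : k + 1 < acc.1.2.length := by omega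
        refine ⟨by simpa using g1, by simpa using g2, ?_, ?_, ?_⟩
        · intro i
          by_cases hik : i = k + 1
          · subst hik
            rw [pvGetD_set_self _ _ _ _ hl1, if_pos ⟨by omega, by omega, hnew⟩]
          · rw [pvGetD_set_ne _ _ _ _ _ (fun h => hik h.symm), g3]
            by_cases hi : 1 ≤ i ∧ i ≤ k ∧ pvNew pre cap fr s i = true
            · rw [if_pos hi, if_pos ⟨hi.1, by omega, hi.2.2⟩]
            · rw [if_neg hi, if_neg (by rintro ⟨a, b, c⟩; exact hi ⟨a, by omega, c⟩)]
        · intro i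
          by_cases hik : i = k + 1
          · subst hik
            rw [pvGetD_set_self _ _ _ _ hl2, if_pos ⟨by omega, by omega, hnew⟩]
          · rw [pvGetD_set_ne _ _ _ _ _ (fun h => hik h.symm), g4]
            by_cases hi : 1 ≤ i ∧ i ≤ k ∧ pvNew pre cap fr s i = true
            · rw [if_pos hi, if_pos ⟨hi.1, by omega, hi.2.2⟩]
            · rw [if_neg hi, if_neg (by rintro ⟨a, b, c⟩; exact hi ⟨a, by omega, c⟩)]
        · rw [g5, hmapf, hnew]
          simp
      · have hnew : pvNew pre cap fr s (k + 1) = false := by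
          simp [pvNew, hentry, hbest]
        have hstep : binB_layerStep pre cap d fr acc k = acc := by
          unfold binB_layerStep
          rw [hread, hentry]
          simp [hbest]
        rw [hstep]
        refine ⟨g1, g2, ?_, ?_, ?_⟩
        · intro i
          rw [g3]
          by_cases hik : i = k + 1
          · subst hik
            rw [if_neg (by omega), if_neg (by simp [hnew])]
          · by_cases hi : 1 ≤ i ∧ i ≤ k ∧ pvNew pre cap fr s i = true
            · rw [if_pos hi, if_pos ⟨hi.1, by omega, hi.2.2⟩]
            · rw [if_neg hi, if_neg (by rintro ⟨a, b, c⟩; exact hi ⟨a, by omega, c⟩)]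
        · intro i
          rw [g4]
          by_cases hik : i = k + 1
          · subst hik
            rw [if_neg (by omega), if_neg (by simp [hnew])]
          · by_cases hi : 1 ≤ i ∧ i ≤ k ∧ pvNew pre cap fr s i = true
            · rw [if_pos hi, if_pos ⟨hi.1, by omega, hi.2.2⟩]
            · rw [if_neg hi, if_neg (by rintro ⟨a, b, c⟩; exact hi ⟨a, by omega, c⟩)]
        · rw [g5, hmapf, hnew]
          simp

-- truncation of a canonical entry at level d
def pvDVal (d : Int) : Option Int → Option Int
  | some e => if e ≤ d then some e else none
  | none => none

def pvPVal (d : Int) (o : Option Int) (p : Int) : Int :=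
  match o with
  | some e => if e ≤ d then p else -1
  | none => -1

theorem pvDVal_some (d e : Int) : pvDVal d (some e) = if e ≤ d then some e else none := rfl
theorem pvDVal_none (d : Int) : pvDVal d none = none := rfl
theorem pvPVal_some (d e p : Int) : pvPVal d (some e) p = if e ≤ d then p else -1 := rfl
theorem pvPVal_none (d p : Int) : pvPVal d none p = -1 := rfl

-- BFS loop invariant: after processing all layers up to d, the arrays realise the
-- canonical table truncated at level d and the frontier is exactly level d
def pvInvB (items : List Int) (cap : Int) (d : Int) (s : List (Option Int) × List Int)
    (fr : List Nat) : Prop :=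
  0 ≤ d ∧
  s.1.length = items.length + 1 ∧ s.2.length = items.length + 1 ∧
  (∀ i : Nat, i ≤ items.length →
    (s.1.getD i none = pvDVal d (pvS (binB_prefix items) cap i).1) ∧
    (s.2.getD i (-1) = pvPVal d (pvS (binB_prefix items) cap i).1 (pvS (binB_prefix items) cap i).2)) ∧
  (∀ j : Nat, j ∈ fr ↔ j ≤ items.length ∧ (pvS (binB_prefix items) cap j).1 = some d)

theorem pvInvB_init (items : List Int) (cap : Int) :
    pvInvB items cap 0
      ((List.replicate (items.length + 1) (none : Option Int)).set 0 (some 0),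
       List.replicate (items.length + 1) (-1)) [0] := by
  refine ⟨le_refl 0, by simp, by simp, ?_, ?_⟩
  · intro i hi
    cases i with
    | zero =>
      constructor
      · rw [pvGetD_set_self _ _ _ _ (by simp), pvS_zero]
        simp [pvDVal]
      · rw [pvGetD_replicate, pvS_zero]
        simp [pvPVal]
    | succ m =>
      constructor
      · rw [pvGetD_set_ne _ _ _ _ _ (by omega), pvGetD_replicate]
        cases hv : (pvS (binB_prefix items) cap (m + 1)).1 with
        | none => rw [pvDVal_none]
        | some e =>
          have := pvLvl_pos (binB_prefix items) cap (m + 1) e (by omega) hv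
          rw [pvDVal_some, if_neg (by omega)]
      · rw [pvGetD_replicate]
        cases hv : (pvS (binB_prefix items) cap (m + 1)).1 with
        | none => rw [pvPVal_none]
        | some e =>
          have := pvLvl_pos (binB_prefix items) cap (m + 1) e (by omega) hv
          rw [pvPVal_some, if_neg (by omega)]
  · intro j
    constructor
    · intro hj
      have : j = 0 := by simpa using hj
      subst this
      exact ⟨by omega, by rw [pvS_zero]⟩
    · rintro ⟨hj, hv⟩
      cases j with
      | zero => simp
      | succ m =>
        have := pvLvl_pos (binB_prefix items) cap (m + 1) 0 (by omega) hv
        omega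

-- semantic content of one layer: on an unsettled index the max-scan result is exactly the
-- canonical entry at level d+1
theorem pvLayer_sem (items : List Int) (cap : Int) (d : Int)
    (s : List (Option Int) × List Int) (fr : List Nat)
    (h : pvInvB items cap d s fr) (i : Nat) (hi1 : 1 ≤ i) (hi2 : i ≤ items.length)
    (hset : s.1.getD i none = none) :
    (0 ≤ binB_best (binB_prefix items) cap i fr ↔
      (pvS (binB_prefix items) cap i).1 = some (d + 1)) ∧
    (0 ≤ binB_best (binB_prefix items) cap i fr →
      binB_best (binB_prefix items) cap i fr = (pvS (binB_prefix items) cap i).2) := by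
  obtain ⟨hd, hl1, hl2, harr, hfr⟩ := h
  have hunset : ∀ e : Int, (pvS (binB_prefix items) cap i).1 = some e → ¬(e ≤ d) := by
    intro e he hle
    have := (harr i hi2).1
    rw [he, pvDVal_some, if_pos hle, hset] at this
    cases this
  -- frontier membership gives level-(d+1) candidates and back
  have hcand_of_fr : ∀ j ∈ fr, j < i → (binB_prefix items).getD i 0 - (binB_prefix items).getD j 0 ≤ cap →
      pvC (binB_prefix items) cap i j = some (d + 1) := by
    intro j hj hji hfeas
    obtain ⟨_, hlj⟩ := (hfr j).mp hj
    exact pvC_mk (binB_prefix items) cap i j d hfeas hlj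
  have hfr_of_cand : ∀ j, j < i → pvC (binB_prefix items) cap i j = some (d + 1) →
      j ∈ fr ∧ (binB_prefix items).getD i 0 - (binB_prefix items).getD j 0 ≤ cap := by
    intro j hji hc
    obtain ⟨hfeas, hlj⟩ := pvC_inv (binB_prefix items) cap i j (d + 1) hc
    have : (d + 1) - 1 = d := by omega
    rw [this] at hlj
    exact ⟨(hfr j).mpr ⟨by omega, hlj⟩, hfeas⟩
  constructor
  · constructor
    · intro hbest
      rcases pvBest_spec (binB_prefix items) cap i fr with ⟨hb, _⟩ | ⟨j, hj, hb, hji, hfeas, hmaxb⟩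
      · rw [hb] at hbest; omega
      · have hcj := hcand_of_fr j hj hji hfeas
        rcases pvS_spec (binB_prefix items) cap i hi1 with ⟨heq, hall⟩ | ⟨v, jm, heq, hjm, hc, hmin, hmax⟩
        · rw [hall j hji] at hcj; cases hcj
        · have hvle : v ≤ d + 1 := hmin j hji (d + 1) hcj
          have hvgt : ¬(v ≤ d) := hunset v (by rw [heq])
          have hv : v = d + 1 := by omega
          rw [heq, hv]
    · intro hlvl
      rcases pvS_spec (binB_prefix items) cap i hi1 with ⟨heq, _⟩ | ⟨v, jm, heq, hjm, hc, hmin, hmax⟩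
      · rw [heq] at hlvl; cases hlvl
      · have hv : v = d + 1 := by
          rw [heq] at hlvl
          exact Option.some.inj hlvl
        subst hv
        obtain ⟨hjmem, hjfeas⟩ := hfr_of_cand jm hjm hc
        rcases pvBest_spec (binB_prefix items) cap i fr with ⟨_, hnone⟩ | ⟨j, hj, hb, hji, hfeas, hmaxb⟩
        · exact absurd ⟨hjm, hjfeas⟩ (hnone jm hjmem)
        · rw [hb]; omega
  · intro hbest
    rcases pvBest_spec (binB_prefix items) cap i fr with ⟨hb, _⟩ | ⟨j, hj, hb, hji, hfeas, hmaxb⟩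
    · rw [hb] at hbest; omega
    · have hcj := hcand_of_fr j hj hji hfeas
      rcases pvS_spec (binB_prefix items) cap i hi1 with ⟨heq, hall⟩ | ⟨v, jm, heq, hjm, hc, hmin, hmax⟩
      · rw [hall j hji] at hcj; cases hcj
      · have hvle : v ≤ d + 1 := hmin j hji (d + 1) hcj
        have hvgt : ¬(v ≤ d) := hunset v (by rw [heq])
        have hv : v = d + 1 := by omega
        subst hv
        obtain ⟨hjmem, hjfeas⟩ := hfr_of_cand jm hjm hc
        have h2 : j ≤ jm := by
          by_contra hcon
          exact hmax j (by omega) hji hcj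
        have h3 : jm ≤ j := by
          have h1 : (jm : Int) ≤ binB_best (binB_prefix items) cap i fr := hmaxb jm hjmem hjm hjfeas
          rw [hb] at h1
          exact_mod_cast h1
        have hje : j = jm := by omega
        rw [hb, heq, hje]

theorem pvInvB_step (items : List Int) (cap : Int) (d : Int)
    (s : List (Option Int) × List Int) (fr : List Nat)
    (h : pvInvB items cap d s fr) :
    pvInvB items cap (d + 1)
      (binB_layer (binB_prefix items) cap items.length d fr s).1
      (binB_layer (binB_prefix items) cap items.length d fr s).2 := by
  obtain ⟨hd, hl1, hl2, harr, hfr⟩ := h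
  unfold binB_layer
  obtain ⟨g1, g2, g3, g4, g5⟩ :=
    pvLayer_syn (binB_prefix items) cap d fr s items.length hl1 hl2 items.length le_rfl
  have hnew_iff : ∀ i : Nat, 1 ≤ i → i ≤ items.length →
      (pvNew (binB_prefix items) cap fr s i = true ↔ (pvS (binB_prefix items) cap i).1 = some (d + 1)) := by
    intro i hi1 hi2
    constructor
    · intro hn
      unfold pvNew at hn
      rw [Bool.and_eq_true, Option.isNone_iff_eq_none, decide_eq_true_eq] at hn
      exact ((pvLayer_sem items cap d s fr ⟨hd, hl1, hl2, harr, hfr⟩ i hi1 hi2 hn.1).1).mp hn.2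
    · intro hlvl
      have hset : s.1.getD i none = none := by
        rw [(harr i hi2).1, hlvl, pvDVal_some, if_neg (by omega)]
      have hb := ((pvLayer_sem items cap d s fr ⟨hd, hl1, hl2, harr, hfr⟩ i hi1 hi2 hset).1).mpr hlvl
      unfold pvNew
      rw [hset]
      simp [hb]
  refine ⟨by omega, g1, g2, ?_, ?_⟩
  · intro i hi
    cases Nat.eq_zero_or_pos i with
    | inl hz =>
      subst hz
      rw [g3 0, g4 0, if_neg (by omega), if_neg (by omega)]
      rw [(harr 0 hi).1, (harr 0 hi).2, pvS_zero]
      constructor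
      · show pvDVal d (some 0) = pvDVal (d + 1) (some 0)
        rw [pvDVal_some, pvDVal_some, if_pos hd, if_pos (by omega : (0 : Int) ≤ d + 1)]
      · show pvPVal d (some 0) (-1) = pvPVal (d + 1) (some 0) (-1)
        rw [pvPVal_some, pvPVal_some, if_pos hd, if_pos (by omega : (0 : Int) ≤ d + 1)]
    | inr hpos =>
      by_cases hset : s.1.getD i none = none
      · by_cases hn : pvNew (binB_prefix items) cap fr s i = true
        · have hlvl := (hnew_iff i hpos hi).mp hn
          have hbest0 : 0 ≤ binB_best (binB_prefix items) cap i fr :=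
            ((pvLayer_sem items cap d s fr ⟨hd, hl1, hl2, harr, hfr⟩ i hpos hi hset).1).mpr hlvl
          have hbval := (pvLayer_sem items cap d s fr ⟨hd, hl1, hl2, harr, hfr⟩ i hpos hi hset).2 hbest0
          rw [g3 i, g4 i, if_pos ⟨hpos, hi, hn⟩, if_pos ⟨hpos, hi, hn⟩, hlvl, hbval]
          constructor
          · rw [pvDVal_some, if_pos (le_refl (d + 1))]
          · rw [pvPVal_some, if_pos (le_refl (d + 1))]
        · have hnolvl : (pvS (binB_prefix items) cap i).1 ≠ some (d + 1) := fun hc => hn ((hnew_iff i hpos hi).mpr hc)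
          have hnold : ∀ e : Int, (pvS (binB_prefix items) cap i).1 = some e → ¬(e ≤ d) := by
            intro e he hle
            have := (harr i hi).1
            rw [he, pvDVal_some, if_pos hle, hset] at this
            cases this
          rw [g3 i, g4 i, if_neg (by rintro ⟨_, _, c⟩; exact hn c), if_neg (by rintro ⟨_, _, c⟩; exact hn c)]
          rw [(harr i hi).1, (harr i hi).2]
          cases hv : (pvS (binB_prefix items) cap i).1 with
          | none => exact ⟨rfl, rfl⟩
          | some e =>
            have he1 : ¬(e ≤ d) := hnold e hv
            have he2 : e ≠ d + 1 := fun hc => hnolvl (by rw [hv, hc])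
            constructor
            · rw [pvDVal_some, pvDVal_some, if_neg he1, if_neg (by omega)]
            · rw [pvPVal_some, pvPVal_some, if_neg he1, if_neg (by omega)]
      · have hsome : ∃ x, s.1.getD i none = some x := by
          cases hx : s.1.getD i none with
          | none => exact absurd hx hset
          | some x => exact ⟨x, rfl⟩
        obtain ⟨x, hx⟩ := hsome
        have hn : pvNew (binB_prefix items) cap fr s i = false := by
          unfold pvNew
          rw [hx]
          rfl
        rw [g3 i, g4 i, if_neg (by rintro ⟨_, _, c⟩; rw [hn] at c; cases c),
            if_neg (by rintro ⟨_, _, c⟩; rw [hn] at c; cases c)]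
        rw [(harr i hi).1, (harr i hi).2]
        have hx' := (harr i hi).1
        rw [hx] at hx'
        cases hv : (pvS (binB_prefix items) cap i).1 with
        | none =>
          rw [hv, pvDVal_none] at hx'
          exact absurd hx' (by simp)
        | some e =>
          rw [hv, pvDVal_some] at hx'
          have hle : e ≤ d := by
            by_contra hc
            rw [if_neg hc] at hx'
            simp at hx'
          constructor
          · rw [pvDVal_some, pvDVal_some, if_pos hle, if_pos (by omega)]
          · rw [pvPVal_some, pvPVal_some, if_pos hle, if_pos (by omega)]
  · intro j
    rw [g5]
    rw [List.mem_filter, List.mem_map]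
    constructor
    · rintro ⟨⟨k, hk, rfl⟩, hnb⟩
      have hk' : k < items.length := List.mem_range.mp hk
      exact ⟨by omega, (hnew_iff (k + 1) (by omega) (by omega)).mp hnb⟩
    · rintro ⟨hj, hlvl⟩
      have hj1 : 1 ≤ j := by
        by_contra hc
        have hz : j = 0 := by omega
        subst hz
        rw [pvS_zero] at hlvl
        injection hlvl with h'
        omega
      refine ⟨⟨j - 1, List.mem_range.mpr (by omega), by omega⟩, ?_⟩
      exact (hnew_iff j hj1 hj).mpr hlvl

-- once the arrays are complete (all levels ≤ d), they give the full canonical parents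
theorem pvInvB_complete (items : List Int) (cap : Int) (d : Int)
    (s : List (Option Int) × List Int) (fr : List Nat)
    (h : pvInvB items cap d s fr)
    (hall : ∀ i : Nat, i ≤ items.length → ∀ e : Int,
      (pvS (binB_prefix items) cap i).1 = some e → e ≤ d) :
    s.2.length = items.length + 1 ∧
    ∀ k : Nat, k ≤ items.length → s.2.getD k (-1) = (pvS (binB_prefix items) cap k).2 := by
  obtain ⟨hd, hl1, hl2, harr, hfr⟩ := h
  refine ⟨hl2, ?_⟩
  intro k hk
  rw [(harr k hk).2]
  cases hv : (pvS (binB_prefix items) cap k).1 with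
  | none =>
    rw [pvPVal_none]
    exact (pvP_none (binB_prefix items) cap k hv).symm
  | some e =>
    rw [pvPVal_some, if_pos (hall k hk e hv)]

theorem binB_bfs_succ (pre : List Int) (cap : Int) (n : Nat) (f : Nat) (d : Int)
    (frontier : List Nat) (s : List (Option Int) × List Int) :
    binB_bfs pre cap n (f + 1) d frontier s
      = if frontier.isEmpty then s
        else binB_bfs pre cap n f (d + 1) (binB_layer pre cap n d frontier s).2
          (binB_layer pre cap n d frontier s).1 := rfl

theorem pvBfs_final (items : List Int) (cap : Int) : ∀ (f : Nat) (d : Int)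
    (fr : List Nat) (s : List (Option Int) × List Int),
    pvInvB items cap d s fr →
    (∀ i : Nat, i ≤ items.length → ∀ e : Int,
      (pvS (binB_prefix items) cap i).1 = some e → e < d + f) →
    (binB_bfs (binB_prefix items) cap items.length f d fr s).2.length = items.length + 1 ∧
    ∀ k : Nat, k ≤ items.length →
      (binB_bfs (binB_prefix items) cap items.length f d fr s).2.getD k (-1)
        = (pvS (binB_prefix items) cap k).2 := by
  intro f
  induction f with
  | zero =>
    intro d fr s hinv hb
    exact pvInvB_complete items cap d s fr hinv
      (fun i hi e he => by have := hb i hi e he; omega)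
  | succ f ih =>
    intro d fr s hinv hb
    rw [binB_bfs_succ]
    by_cases hemp : fr.isEmpty
    · rw [if_pos hemp]
      have hnone : ∀ j : Nat, j ≤ items.length → (pvS (binB_prefix items) cap j).1 ≠ some d := by
        intro j hj hc
        have := (hinv.2.2.2.2 j).mpr ⟨hj, hc⟩
        rw [List.isEmpty_iff] at hemp
        rw [hemp] at this
        cases this
      have hgap := pvGap (binB_prefix items) cap items.length d hinv.1 hnone
      exact pvInvB_complete items cap d s fr hinv
        (fun i hi e he => by have := hgap i hi e he; omega)
    · rw [if_neg hemp]
      exact ih (d + 1) _ _ (pvInvB_step items cap d s fr hinv)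
        (fun i hi e he => by have := hb i hi e he; omega)

-- maximum canonical level is at most the index
theorem pvLvl_le (pre : List Int) (cap : Int) : ∀ i : Nat, ∀ e : Int,
    (pvS pre cap i).1 = some e → e ≤ (i : Int) := by
  intro i
  induction i using Nat.strong_induction_on with
  | _ i ih =>
    intro e he
    cases i with
    | zero =>
      rw [pvS_zero] at he
      injection he with h'
      omega
    | succ m =>
      rcases pvS_spec pre cap (m + 1) (by omega) with ⟨heq, _⟩ | ⟨v, jm, heq, hjm, hc, _, _⟩
      · rw [heq] at he; cases he
      · have hv : v = e := by rw [heq] at he; exact Option.some.inj he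
        subst hv
        obtain ⟨_, hl⟩ := pvC_inv pre cap (m + 1) jm v hc
        have := ih jm (by omega) (v - 1) hl
        have : (jm : Int) ≤ (m : Int) := by exact_mod_cast Nat.le_of_lt_succ hjm
        push_cast
        omega

-- the final parent arrays of the two ports agree pointwise
theorem pvParents_eq (items : List Int) (cap : Int) : ∀ k : Nat,
    (binA_loop items cap items.length).2.getD k (-1)
      = (binB_bfs (binB_prefix items) cap items.length (items.length + 2) 0 [0]
          ((List.replicate (items.length + 1) (none : Option Int)).set 0 (some 0),
           List.replicate (items.length + 1) (-1))).2.getD k (-1) := by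
  intro k
  unfold binA_loop
  obtain ⟨a1, a2, a3, a4⟩ := pvInvA_foldl items cap items.length le_rfl
  obtain ⟨b1, b2⟩ := pvBfs_final items cap (items.length + 2) 0 [0] _
    (pvInvB_init items cap)
    (by
      intro i hi e he
      have h1 := pvLvl_le (binB_prefix items) cap i e he
      have h2 : (i : Int) ≤ (items.length : Int) := by exact_mod_cast hi
      push_cast
      omega)
  rcases Nat.lt_or_ge k (items.length + 1) with hk | hk
  · rw [(a3 k (by omega)).2, b2 k (by omega)]
  · rw [List.getD_eq_default _ _ (by omega), List.getD_eq_default _ _ (by omega)]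

-- A appends then reverses; B's recursive chain builds the same list front-to-back
theorem pvBack_chain (items : List Int) (lA pB : List Int)
    (h : ∀ k : Nat, lA.getD k (-1) = pB.getD k (-1)) :
    ∀ (f : Nat) (i : Int) (acc : List (List Int)),
      binA_back items lA f i acc = acc ++ (binB_chain items pB f i).reverse := by
  intro f
  induction f with
  | zero => intro i acc; simp [binA_back, binB_chain]
  | succ f ih =>
    intro i acc
    simp only [binA_back, binB_chain]
    by_cases hi : 0 < i
    · rw [if_pos hi, if_neg (by omega), h i.toNat, ih]
      simp
    · rw [if_neg hi, if_pos (by omega)]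
      simp

-- ===== VERDICT (by name: the statement is the Claim_ definition above) =====
theorem bin_packing_spec : Claim_equal_bin_packing := by
  intro items cap _
  unfold Spec_bin_packing
  show (let n := items.length
        let s := binA_loop items cap n
        (binA_back items s.2 (n + 1) (n : Int) []).reverse)
      = (let n := items.length
         let s := binB_bfs (binB_prefix items) cap n (n + 2) 0 [0]
           ((List.replicate (n + 1) (none : Option Int)).set 0 (some 0),
            List.replicate (n + 1) (-1))
         binB_chain items s.2 (n + 1) (n : Int))
  simp only []
  rw [pvBack_chain items _ _ (pvParents_eq items cap) (items.length + 1) (items.length : Int) []]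
  simp
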